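-- pv_equiv track=rewrite | github.com/zzkkyys/Alfred-Simple-iCost | src/icon_manager.py | build_icons_index
-- ===== SOURCE A (Python) =====
-- from typing import Optional, Dict
--
-- def build_icons_index(icons_list: list) -> Dict[str, str]:
--     """
--     构建图标索引，将关键词映射到图标文件名
--     只在首次调用时构建，后续使用缓存
--
--     Returns:
--         Dict[关键词, 图标文件名]
--     """
--     index = {}
--
--     for icon_name in icons_list:
--         # 从文件名中提取关键词
--         base_name = icon_name.lower()
--         # 移除常见后缀
--         for suffix in ['_normal@3x.png', '_normal@2x.png', '_normal.png', '.png', '.jpg', '.icns']: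
--             if base_name.endswith(suffix):
--                 base_name = base_name[:-len(suffix)]
--                 break
--
--         # 提取关键词（移除前缀如 color_, account_）
--         keyword = base_name
--         for prefix in ['color_', 'account_', 'icon_']:
--             if keyword.startswith(prefix):
--                 keyword = keyword[len(prefix):]
--                 break
--
--         # 存储到索引（优先 color_ 前缀）
--         if keyword not in index:
--             index[keyword] = icon_name
--         elif icon_name.lower().startswith('color_') and not index[keyword].lower().startswith('color_'):
--             # 优先使用 color_ 前缀的图标
--             index[keyword] = icon_name
--
--     return index
-- ===== SOURCE B (Python) =====
-- def _keyword(icon_name):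
--     base = icon_name.lower()
--     for suffix in ['_normal@3x.png', '_normal@2x.png', '_normal.png', '.png', '.jpg', '.icns']:
--         if base.endswith(suffix):
--             base = base[:-len(suffix)]
--             break
--     for prefix in ['color_', 'account_', 'icon_']:
--         if base.startswith(prefix):
--             base = base[len(prefix):]
--             break
--     return base
--
-- def build_icons_index(icons_list):
--     # Two first-wins buckets (color_-prefixed icons vs the rest) plus the
--     # first-occurrence order of keywords; merge at the end, color bucket first.
--     color, plain, order = {}, {}, []
--     for icon in icons_list:
--         kw = _keyword(icon)
--         if kw not in color and kw not in plain:
--             order.append(kw)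
--         bucket = color if icon.lower().startswith('color_') else plain
--         if kw not in bucket:
--             bucket[kw] = icon
--     return {kw: (color[kw] if kw in color else plain[kw]) for kw in order}
-- ===== Notes on version B (the rewrite author's own statement) =====
-- stated objective: alternative
-- what changed: Replaces the single dict with a conditional-overwrite elif branch by two first-wins buckets (color_-prefixed icons vs the rest) plus a first-occurrence keyword order list, merged at the end with the color bucket taking priority.
import Mathlib
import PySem

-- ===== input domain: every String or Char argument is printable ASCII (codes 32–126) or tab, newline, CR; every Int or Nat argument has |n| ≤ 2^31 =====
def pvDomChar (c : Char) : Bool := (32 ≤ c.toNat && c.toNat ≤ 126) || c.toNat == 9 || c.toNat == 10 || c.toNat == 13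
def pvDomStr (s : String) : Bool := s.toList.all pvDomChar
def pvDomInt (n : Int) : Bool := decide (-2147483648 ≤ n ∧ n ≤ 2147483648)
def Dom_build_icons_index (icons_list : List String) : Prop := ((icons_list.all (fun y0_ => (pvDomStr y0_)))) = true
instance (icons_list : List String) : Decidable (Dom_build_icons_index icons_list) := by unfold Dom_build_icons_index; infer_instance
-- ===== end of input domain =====

-- B replaces A's single dict with conditional elif-overwrite by two first-wins buckets (color_ vs rest)
-- plus a first-occurrence keyword order, merged at the end with the color bucket taking priority.

-- ===== PORT A =====
-- literal transliteration of A: one insertion-ordered dict, first insert wins unless a later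
-- color_-prefixed icon replaces a stored non-color_ one (overwrite keeps position)
def build_icons_index (icons_list : List String) : List (String × String) :=
  (icons_list.foldl
    (fun (index : PySem.Dict String String) icon_name =>
      let base0 := PySem.Str.lower icon_name
      let base_name :=
        if PySem.Str.endswith base0 "_normal@3x.png" then PySem.Str.slice base0 none (some (-14))
        else if PySem.Str.endswith base0 "_normal@2x.png" then PySem.Str.slice base0 none (some (-14))
        else if PySem.Str.endswith base0 "_normal.png" then PySem.Str.slice base0 none (some (-11))
        else if PySem.Str.endswith base0 ".png" then PySem.Str.slice base0 none (some (-4))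
        else if PySem.Str.endswith base0 ".jpg" then PySem.Str.slice base0 none (some (-4))
        else if PySem.Str.endswith base0 ".icns" then PySem.Str.slice base0 none (some (-5))
        else base0
      let keyword :=
        if PySem.Str.startswith base_name "color_" then PySem.Str.slice base_name (some 6) none
        else if PySem.Str.startswith base_name "account_" then PySem.Str.slice base_name (some 8) none
        else if PySem.Str.startswith base_name "icon_" then PySem.Str.slice base_name (some 5) none
        else base_name
      if ¬ index.contains keyword then index.insert keyword icon_name
      else if PySem.Str.startswith (PySem.Str.lower icon_name) "color_"
              && ! PySem.Str.startswith (PySem.Str.lower (index.getD keyword "")) "color_"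
        then index.insert keyword icon_name
      else index)
    PySem.Dict.empty).items

-- ===== PORT B =====
-- Source B's _keyword: strip the first matching suffix, then the first matching prefix
def pvKeyword (icon_name : String) : String :=
  let base0 := PySem.Str.lower icon_name
  let base :=
    if PySem.Str.endswith base0 "_normal@3x.png" then PySem.Str.slice base0 none (some (-14))
    else if PySem.Str.endswith base0 "_normal@2x.png" then PySem.Str.slice base0 none (some (-14))
    else if PySem.Str.endswith base0 "_normal.png" then PySem.Str.slice base0 none (some (-11))
    else if PySem.Str.endswith base0 ".png" then PySem.Str.slice base0 none (some (-4))
    else if PySem.Str.endswith base0 ".jpg" then PySem.Str.slice base0 none (some (-4))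
    else if PySem.Str.endswith base0 ".icns" then PySem.Str.slice base0 none (some (-5))
    else base0
  if PySem.Str.startswith base "color_" then PySem.Str.slice base (some 6) none
  else if PySem.Str.startswith base "account_" then PySem.Str.slice base (some 8) none
  else if PySem.Str.startswith base "icon_" then PySem.Str.slice base (some 5) none
  else base

-- Source B's loop state: (color bucket, plain bucket, first-occurrence keyword order)
def build_icons_index_alt (icons_list : List String) : List (String × String) :=
  let st := icons_list.foldl
    (fun (st : PySem.Dict String String × PySem.Dict String String × List String) icon =>
      let kw := pvKeyword icon
      let order := if st.1.contains kw || st.2.1.contains kw then st.2.2 else st.2.2 ++ [kw]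
      if PySem.Str.startswith (PySem.Str.lower icon) "color_" then
        (if st.1.contains kw then st.1 else st.1.insert kw icon, st.2.1, order)
      else
        (st.1, if st.2.1.contains kw then st.2.1 else st.2.1.insert kw icon, order))
    (PySem.Dict.empty, PySem.Dict.empty, [])
  -- final dict comprehension: {kw: color[kw] if kw in color else plain[kw] for kw in order}
  (st.2.2.foldl
    (fun (d : PySem.Dict String String) kw =>
      d.insert kw (if st.1.contains kw then st.1.getD kw "" else st.2.1.getD kw ""))
    PySem.Dict.empty).items

-- ===== PRECONDITION & SPEC =====
def Spec_build_icons_index (icons_list : List String) (out : List (String × String)) : Prop := out = build_icons_index_alt icons_list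
instance (icons_list : List String) (out : List (String × String)) : Decidable (Spec_build_icons_index icons_list out) := by unfold Spec_build_icons_index; infer_instance

-- ===== CLAIM (what is proved, stated in full; the proofs are below) =====
def Claim_equal_build_icons_index : Prop := ∀ (icons_list : List String), Dom_build_icons_index icons_list → Spec_build_icons_index icons_list (build_icons_index icons_list)

-- ===== LEMMAS AND PROOFS =====

def pvIsColor (v : String) : Bool := PySem.Str.startswith (PySem.Str.lower v) "color_"

def pvMval (c p : PySem.Dict String String) (kw : String) : String :=
  if c.contains kw then c.getD kw "" else p.getD kw ""

def pvAStep (index : PySem.Dict String String) (x : String) : PySem.Dict String String :=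
  if ¬ index.contains (pvKeyword x) then index.insert (pvKeyword x) x
  else if pvIsColor x && ! pvIsColor (index.getD (pvKeyword x) "") then index.insert (pvKeyword x) x
  else index

def pvBStep (st : PySem.Dict String String × PySem.Dict String String × List String) (x : String) :
    PySem.Dict String String × PySem.Dict String String × List String :=
  let kw := pvKeyword x
  let order := if st.1.contains kw || st.2.1.contains kw then st.2.2 else st.2.2 ++ [kw]
  if pvIsColor x then (if st.1.contains kw then st.1 else st.1.insert kw x, st.2.1, order)
  else (st.1, if st.2.1.contains kw then st.2.1 else st.2.1.insert kw x, order)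

theorem pvA_eq (l : List String) : build_icons_index l = (l.foldl pvAStep PySem.Dict.empty).items := rfl

theorem pvB_eq (l : List String) :
    build_icons_index_alt l =
      ((l.foldl pvBStep (PySem.Dict.empty, PySem.Dict.empty, [])).2.2.foldl
        (fun d kw => d.insert kw (pvMval (l.foldl pvBStep (PySem.Dict.empty, PySem.Dict.empty, [])).1
          (l.foldl pvBStep (PySem.Dict.empty, PySem.Dict.empty, [])).2.1 kw)) PySem.Dict.empty).items := rfl

def pvInv (index c p : PySem.Dict String String) (order : List String) : Prop :=
  index.items = order.map (fun kw => (kw, pvMval c p kw)) ∧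
  order.Nodup ∧
  (∀ kw, c.contains kw = true → kw ∈ order) ∧
  (∀ kw, p.contains kw = true → kw ∈ order) ∧
  (∀ kw ∈ order, (c.contains kw || p.contains kw) = true) ∧
  (∀ v ∈ c.values, pvIsColor v = true) ∧
  (∀ v ∈ p.values, pvIsColor v = false)

theorem pvGetD_mem_values (d : PySem.Dict String String) (k : String) (h : d.contains k = true) :
    d.getD k "" ∈ d.values := by
  have h2 := PySem.Dict.contains_eq_isSome_get? d k
  rw [h] at h2
  obtain ⟨v, hv⟩ := Option.isSome_iff_exists.mp h2.symm
  rw [PySem.Dict.getD_of_get?_eq_some d "" hv]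
  exact List.mem_map.mpr ⟨(k, v), PySem.Dict.mem_items_of_get?_eq_some d hv, rfl⟩

set_option maxHeartbeats 2000000 in
theorem pvInv_step (index c p : PySem.Dict String String) (order : List String) (x : String)
    (h : pvInv index c p order) :
    pvInv (pvAStep index x) (pvBStep (c, p, order) x).1 (pvBStep (c, p, order) x).2.1
      (pvBStep (c, p, order) x).2.2 := by
  obtain ⟨h1, h0, h2c, h2p, h3, h4c, h4p⟩ := h
  generalize hkwx : pvKeyword x = kw
  generalize hiscx : pvIsColor x = isc
  have hkeys : index.keys = order := by
    simp [PySem.Dict.keys, h1, Function.comp_def]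
  have hcont : index.contains kw = true ↔ kw ∈ order := by
    rw [PySem.Dict.contains_iff_mem_keys, hkeys]
  have hnodk : index.keys.Nodup := by rw [hkeys]; exact h0
  by_cases hmem : kw ∈ order
  · -- keyword already present
    have hict : index.contains kw = true := hcont.mpr hmem
    have hstored : index.getD kw "" = pvMval c p kw := by
      have hm : (kw, pvMval c p kw) ∈ index.items := by
        rw [h1]; exact List.mem_map.mpr ⟨kw, hmem, rfl⟩
      exact PySem.Dict.getD_of_mem_items index hm hnodk ""
    have hcolstored : pvIsColor (index.getD kw "") = c.contains kw := by
      rw [hstored, pvMval]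
      by_cases hc : c.contains kw = true
      · rw [if_pos hc, hc]; exact h4c _ (pvGetD_mem_values c kw hc)
      · have hc' : c.contains kw = false := by simpa using hc
        have hp : p.contains kw = true := by
          have h' := h3 kw hmem; rw [hc'] at h'; simpa using h'
        rw [if_neg hc, hc']; exact h4p _ (pvGetD_mem_values p kw hp)
    by_cases hisc : isc = true
    · by_cases hcc : c.contains kw = true
      · -- stored already color: nothing changes on either side
        have hA : pvAStep index x = index := by
          unfold pvAStep; rw [hkwx, hiscx]
          simp [hict, hisc, hcolstored, hcc]
        have hB : pvBStep (c, p, order) x = (c, p, order) := by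
          unfold pvBStep; rw [hkwx, hiscx]
          simp [hisc, hcc]
        rw [hA, hB]
        dsimp only
        exact ⟨h1, h0, h2c, h2p, h3, h4c, h4p⟩
      · -- A overwrites, B inserts into the color bucket
        have hcc' : c.contains kw = false := by simpa using hcc
        have hp : p.contains kw = true := by
          have h' := h3 kw hmem; rw [hcc'] at h'; simpa using h'
        have hA : pvAStep index x = index.insert kw x := by
          unfold pvAStep; rw [hkwx, hiscx]
          simp [hict, hisc, hcolstored, hcc']
        have hB : pvBStep (c, p, order) x = (c.insert kw x, p, order) := by
          unfold pvBStep; rw [hkwx, hiscx]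
          simp [hisc, hcc', hp]
        rw [hA, hB]
        dsimp only
        refine ⟨?_, h0, ?_, h2p, ?_, ?_, h4p⟩
        · rw [PySem.Dict.items_insert_of_contains index x hict, h1, List.map_map]
          refine List.map_congr_left (fun kw' hkw' => ?_)
          by_cases he : kw' = kw
          · subst he
            simp [pvMval]
          · simp [pvMval, PySem.Dict.contains_insert, he, PySem.Dict.getD_insert]
        · intro kw' hc'
          rw [PySem.Dict.contains_insert] at hc'
          rcases Bool.or_eq_true_iff.mp hc' with h' | h'
          · exact (eq_of_beq h') ▸ hmem
          · exact h2c kw' h'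
        · intro kw' hkw'
          have h' := h3 kw' hkw'
          rw [PySem.Dict.contains_insert]
          rcases Bool.or_eq_true_iff.mp h' with h'' | h'' <;> simp [h'']
        · intro v hv
          rcases PySem.Dict.mem_values_insert c kw x v hv with h' | h'
          · exact h' ▸ (hiscx.trans hisc)
          · exact h4c v h'
    · -- non-color icon, keyword present: A unchanged; B may fill the plain bucket
      have hisc' : isc = false := by simpa using hisc
      have hA : pvAStep index x = index := by
        unfold pvAStep; rw [hkwx, hiscx]
        simp [hict, hisc']
      by_cases hpc : p.contains kw = true
      · have hB : pvBStep (c, p, order) x = (c, p, order) := by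
          unfold pvBStep; rw [hkwx, hiscx]
          simp [hisc', hpc]
        rw [hA, hB]
        dsimp only
        exact ⟨h1, h0, h2c, h2p, h3, h4c, h4p⟩
      · have hpc' : p.contains kw = false := by simpa using hpc
        have hcc : c.contains kw = true := by
          have h' := h3 kw hmem; rw [hpc'] at h'; simpa using h'
        have hB : pvBStep (c, p, order) x = (c, p.insert kw x, order) := by
          unfold pvBStep; rw [hkwx, hiscx]
          simp [hisc', hpc', hcc]
        rw [hA, hB]
        dsimp only
        refine ⟨?_, h0, h2c, ?_, ?_, h4c, ?_⟩
        · rw [h1]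
          refine List.map_congr_left (fun kw' hkw' => ?_)
          by_cases he : kw' = kw
          · subst he; simp [pvMval, hcc]
          · simp [pvMval, PySem.Dict.getD_insert, he]
        · intro kw' hc'
          rw [PySem.Dict.contains_insert] at hc'
          rcases Bool.or_eq_true_iff.mp hc' with h' | h'
          · exact (eq_of_beq h') ▸ hmem
          · exact h2p kw' h'
        · intro kw' hkw'
          have h' := h3 kw' hkw'
          rcases Bool.or_eq_true_iff.mp h' with h'' | h'' <;>
            simp [PySem.Dict.contains_insert, h'']
        · intro v hv
          rcases PySem.Dict.mem_values_insert p kw x v hv with h' | h'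
          · exact h' ▸ (hiscx.trans hisc')
          · exact h4p v h'
  · -- fresh keyword: both sides append it
    have hcf : c.contains kw = false := by
      by_contra hc; exact hmem (h2c kw (by simpa using hc))
    have hpf : p.contains kw = false := by
      by_contra hc; exact hmem (h2p kw (by simpa using hc))
    have hic : index.contains kw = false := by
      by_contra hc; exact hmem (hcont.mp (by simpa using hc))
    have hA : pvAStep index x = index.insert kw x := by
      unfold pvAStep; rw [hkwx]
      simp [hic]
    have hitems : (index.insert kw x).items = index.items ++ [(kw, x)] :=
      PySem.Dict.items_insert_of_not_contains index x hic
    have hnodup' : (order ++ [kw]).Nodup := by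
      refine List.Nodup.append h0 (List.nodup_singleton kw) ?_
      intro a ha hb
      have hab : a = kw := by simpa using hb
      exact hmem (hab ▸ ha)
    by_cases hisc : isc = true
    · have hB : pvBStep (c, p, order) x = (c.insert kw x, p, order ++ [kw]) := by
        unfold pvBStep; rw [hkwx, hiscx]
        simp [hisc, hcf, hpf]
      rw [hA, hB]
      dsimp only
      refine ⟨?_, hnodup', ?_, ?_, ?_, ?_, h4p⟩
      · rw [hitems, h1, List.map_append]
        have e1 : List.map (fun kw' => (kw', pvMval (c.insert kw x) p kw')) order
            = List.map (fun kw' => (kw', pvMval c p kw')) order := by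
          refine List.map_congr_left (fun kw' hkw' => ?_)
          have hne : kw' ≠ kw := fun he => hmem (he ▸ hkw')
          simp [pvMval, PySem.Dict.contains_insert, hne, PySem.Dict.getD_insert]
        have e2 : List.map (fun kw' => (kw', pvMval (c.insert kw x) p kw')) [kw]
            = [(kw, x)] := by
          simp [pvMval, PySem.Dict.contains_insert, PySem.Dict.getD_insert]
        rw [e1, e2]
      · intro kw' hc'
        rw [PySem.Dict.contains_insert] at hc'
        rcases Bool.or_eq_true_iff.mp hc' with h' | h'
        · simp [List.mem_append, eq_of_beq h']
        · exact List.mem_append.mpr (Or.inl (h2c kw' h'))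
      · intro kw' hc'; exact List.mem_append.mpr (Or.inl (h2p kw' hc'))
      · intro kw' hkw'
        rcases List.mem_append.mp hkw' with h' | h'
        · have h'' := h3 kw' h'
          rw [PySem.Dict.contains_insert]
          rcases Bool.or_eq_true_iff.mp h'' with h''' | h''' <;> simp [h''']
        · have he : kw' = kw := by simpa using h'
          simp [he]
      · intro v hv
        rcases PySem.Dict.mem_values_insert c kw x v hv with h' | h'
        · exact h' ▸ (hiscx.trans hisc)
        · exact h4c v h'
    · have hisc' : isc = false := by simpa using hisc
      have hB : pvBStep (c, p, order) x = (c, p.insert kw x, order ++ [kw]) := by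
        unfold pvBStep; rw [hkwx, hiscx]
        simp [hisc', hcf, hpf]
      rw [hA, hB]
      dsimp only
      refine ⟨?_, hnodup', ?_, ?_, ?_, h4c, ?_⟩
      · rw [hitems, h1, List.map_append]
        have e1 : List.map (fun kw' => (kw', pvMval c (p.insert kw x) kw')) order
            = List.map (fun kw' => (kw', pvMval c p kw')) order := by
          refine List.map_congr_left (fun kw' hkw' => ?_)
          have hne : kw' ≠ kw := fun he => hmem (he ▸ hkw')
          simp [pvMval, PySem.Dict.getD_insert, hne]
        have e2 : List.map (fun kw' => (kw', pvMval c (p.insert kw x) kw')) [kw]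
            = [(kw, x)] := by
          simp [pvMval, hcf, PySem.Dict.getD_insert]
        rw [e1, e2]
      · intro kw' hc'; exact List.mem_append.mpr (Or.inl (h2c kw' hc'))
      · intro kw' hc'
        rw [PySem.Dict.contains_insert] at hc'
        rcases Bool.or_eq_true_iff.mp hc' with h' | h'
        · simp [List.mem_append, eq_of_beq h']
        · exact List.mem_append.mpr (Or.inl (h2p kw' h'))
      · intro kw' hkw'
        rcases List.mem_append.mp hkw' with h' | h'
        · have h'' := h3 kw' h'
          rw [PySem.Dict.contains_insert]
          rcases Bool.or_eq_true_iff.mp h'' with h''' | h''' <;> simp [h''']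
        · have he : kw' = kw := by simpa using h'
          simp [he]
      · intro v hv
        rcases PySem.Dict.mem_values_insert p kw x v hv with h' | h'
        · exact h' ▸ (hiscx.trans hisc')
        · exact h4p v h'

theorem pvInv_init : pvInv PySem.Dict.empty PySem.Dict.empty PySem.Dict.empty [] := by
  refine ⟨rfl, List.nodup_nil, ?_, ?_, ?_, ?_, ?_⟩
  · intro kw h; rw [PySem.Dict.contains_empty] at h; exact absurd h (by simp)
  · intro kw h; rw [PySem.Dict.contains_empty] at h; exact absurd h (by simp)
  · intro kw h; exact absurd h (List.not_mem_nil)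
  · intro v hv; exact absurd hv (List.not_mem_nil)
  · intro v hv; exact absurd hv (List.not_mem_nil)

theorem pvInv_step' (index : PySem.Dict String String)
    (st : PySem.Dict String String × PySem.Dict String String × List String) (x : String)
    (h : pvInv index st.1 st.2.1 st.2.2) :
    pvInv (pvAStep index x) (pvBStep st x).1 (pvBStep st x).2.1 (pvBStep st x).2.2 := by
  obtain ⟨c, p, order⟩ := st
  exact pvInv_step index c p order x h

theorem pvInv_foldl (l : List String) (index : PySem.Dict String String)
    (st : PySem.Dict String String × PySem.Dict String String × List String)
    (h : pvInv index st.1 st.2.1 st.2.2) :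
    pvInv (l.foldl pvAStep index) (l.foldl pvBStep st).1
      (l.foldl pvBStep st).2.1 (l.foldl pvBStep st).2.2 := by
  induction l generalizing index st with
  | nil => exact h
  | cons x t ih =>
      simp only [List.foldl_cons]
      exact ih (pvAStep index x) (pvBStep st x) (pvInv_step' index st x h)

theorem pvAB_eq : ∀ (l : List String),
    build_icons_index l = build_icons_index_alt l := by
  intro l
  rw [pvA_eq, pvB_eq]
  obtain ⟨h1, h0, -, -, -, -, -⟩ :=
    pvInv_foldl l PySem.Dict.empty (PySem.Dict.empty, PySem.Dict.empty, []) pvInv_init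
  rw [h1]
  rw [PySem.Dict.items_foldl_insert_fresh
    (l.foldl pvBStep (PySem.Dict.empty, PySem.Dict.empty, [])).2.2
    (fun kw => kw)
    (fun kw => pvMval (l.foldl pvBStep (PySem.Dict.empty, PySem.Dict.empty, [])).1
      (l.foldl pvBStep (PySem.Dict.empty, PySem.Dict.empty, [])).2.1 kw)
    PySem.Dict.empty
    (fun a _ => PySem.Dict.contains_empty a)
    (by simpa using h0)]
  rfl

-- ===== VERDICT (by name: the statement is the Claim_ definition above) =====
theorem build_icons_index_spec : Claim_equal_build_icons_index := by
  intro icons_list _hdom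
  unfold Spec_build_icons_index
  exact pvAB_eq icons_list
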